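-- pv_equiv track=rewrite | github.com/damoang/theme | mass-provision-google-cloud-ops-agents.py | _ValidateAgentTypes
-- ===== SOURCE A (Python) =====
-- import collections
-- import enum
-- from typing import Any, Dict, Iterable, List, Tuple
--
-- class AgentType(str, enum.Enum):
--   LOGGING = "logging"
--   METRICS = "metrics"
--   OPS_AGENT = "ops-agent"
--
-- def _ValidateAgentTypes(agent_rules: Iterable[Dict[str, str]]) -> List[str]:
--   """Validates types of agent rules."""
--   agent_types = collections.Counter(r["type"] for r in agent_rules)
--   duplicate_types = sorted(k for k, v in agent_types.items() if v > 1)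
--   errors = [
--       "At most one agent with type [%s] is allowed." % t
--       for t in duplicate_types
--   ]
--   # When agent type is ops agent, it has to be the only agent type.
--   if agent_types[AgentType.OPS_AGENT] > 0 and sum(agent_types.values()) > 1:
--     errors.append(
--         "An agent with type [%s] is detected. No other agent type is allowed. "
--         "The Ops Agent has both a logging module and a metrics module already."
--         % AgentType.OPS_AGENT)
--   return errors
-- ===== SOURCE B (Python) =====
-- def _ValidateAgentTypes(agent_rules):
--   """Validates types of agent rules."""
--   types = sorted(r["type"] for r in agent_rules)
--   errors = []
--   prev = None
--   reported = None
--   for t in types: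
--     if t == prev and t != reported:
--       errors.append("At most one agent with type [%s] is allowed." % t)
--       reported = t
--     prev = t
--   if "ops-agent" in types and len(types) > 1:
--     errors.append(
--         "An agent with type [ops-agent] is detected. "
--         "No other agent type is allowed. "
--         "The Ops Agent has both a logging module and a metrics module already.")
--   return errors
-- ===== Notes on version B (the rewrite author's own statement) =====
-- stated objective: alternative
-- what changed: Replaces the Counter dictionary plus sort-of-duplicate-keys strategy by materializing the type list, sorting it once, and emitting one error per run of adjacent equal entries in a single scan, with the ops-agent conflict decided by membership and length of the sorted list; Pre_ excludes rules without a 'type' key, on which A raises KeyError.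
-- intended difference: On inputs containing an ops-agent rule together with any other rule, A's conflict message names the enum member ('An agent with type [AgentType.OPS_AGENT] is detected. ...', an accident of %s-formatting a str-enum on Python 3.11) while B names the actual type value '[ops-agent]', consistent with the duplicate-type messages, which is the intended user-facing text. — e.g. on _ValidateAgentTypes([[("type", "ops-agent")], [("type", "logging")]]): A returns ["An agent with type [AgentType.OPS_AGENT] is detected. No other agent type is allowed. The Ops Agent has both a loggin…, B returns ["An agent with type [ops-agent] is detected. No other agent type is allowed. The Ops Agent has both a logging module a…
import Mathlib
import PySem

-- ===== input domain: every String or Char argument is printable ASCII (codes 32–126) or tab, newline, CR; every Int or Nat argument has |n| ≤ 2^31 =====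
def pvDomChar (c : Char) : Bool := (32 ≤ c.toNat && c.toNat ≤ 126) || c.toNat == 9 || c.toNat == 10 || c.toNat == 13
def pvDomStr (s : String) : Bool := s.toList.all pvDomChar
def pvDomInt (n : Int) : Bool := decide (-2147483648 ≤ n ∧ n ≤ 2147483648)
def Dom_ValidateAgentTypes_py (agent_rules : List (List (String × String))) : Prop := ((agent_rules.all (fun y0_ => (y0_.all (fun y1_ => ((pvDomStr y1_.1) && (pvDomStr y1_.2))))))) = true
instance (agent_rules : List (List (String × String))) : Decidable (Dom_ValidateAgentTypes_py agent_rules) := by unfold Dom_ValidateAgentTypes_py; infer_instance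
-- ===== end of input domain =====

-- B sorts the type list once and scans adjacent equal entries instead of A's Counter plus
-- sort-of-duplicate-keys; B's conflict message names the type value, A's the enum member (see D_).

def vMsgDup (t : String) : String :=
  "At most one agent with type [" ++ t ++ "] is allowed."

-- A: '%s' of the str-Enum member renders the member name on the Python (3.11) running here
def vMsgOpsA : String :=
  "An agent with type [AgentType.OPS_AGENT] is detected. No other agent type is allowed. The Ops Agent has both a logging module and a metrics module already."

-- B: the message names the actual type value
def vMsgOpsB : String :=
  "An agent with type [ops-agent] is detected. No other agent type is allowed. The Ops Agent has both a logging module and a metrics module already."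

-- r["type"]; total stand-in (Pre_ guarantees the key is present)
def vType (r : List (String × String)) : String :=
  ((PySem.Dict.mk r).get? "type").getD ""

-- ===== PORT A =====
def ValidateAgentTypes_py (agent_rules : List (List (String × String))) : List String :=
  let agent_types := PySem.Dict.counter (agent_rules.map vType)
  let duplicate_types :=
    PySem.List.sorted ((agent_types.items.filter (fun kv => 1 < kv.2)).map (fun kv => kv.1)) (fun x => x) false
  let errors := duplicate_types.map vMsgDup
  if 0 < agent_types.getD "ops-agent" 0 ∧ 1 < agent_types.values.sum then errors ++ [vMsgOpsA]
  else errors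

-- ===== PORT B =====
-- loop body of Source B: state is (prev, reported, errors)
def vStep (s : Option String × Option String × List String) (t : String) :
    Option String × Option String × List String :=
  if s.1 == some t && s.2.1 != some t then (some t, some t, s.2.2 ++ [vMsgDup t])
  else (some t, s.2.1, s.2.2)

def ValidateAgentTypes_py_alt (agent_rules : List (List (String × String))) : List String :=
  let types := PySem.List.sorted (agent_rules.map vType) (fun x => x) false
  let st := types.foldl vStep (none, none, [])
  let errors := st.2.2
  if types.contains "ops-agent" && decide (1 < types.length) then errors ++ [vMsgOpsB]
  else errors

-- ===== PRECONDITION & SPEC =====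
-- Pre_ excludes exactly the rules without a "type" key, on which A raises KeyError.
def Pre_ValidateAgentTypes_py (agent_rules : List (List (String × String))) : Prop :=
  agent_rules.all (fun r => r.any (fun p => p.1 == "type")) = true
instance (agent_rules : List (List (String × String))) : Decidable (Pre_ValidateAgentTypes_py agent_rules) := by unfold Pre_ValidateAgentTypes_py; infer_instance

def pvWitness_ValidateAgentTypes_py : (List (List (String × String))) :=
  [[("type", "logging")], [("type", "logging")], [("type", "metrics")]]

-- On inputs with an ops-agent rule plus any other rule, A's conflict message names the enum member
-- ('... [AgentType.OPS_AGENT] ...', an accident of %s-formatting a str-enum), B names the actual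
-- type value '[ops-agent]', consistent with the duplicate messages — the intended user-facing text.
def D_ValidateAgentTypes_py (agent_rules : List (List (String × String))) : Prop :=
  (agent_rules.any (fun r => (((PySem.Dict.mk r).get? "type").getD "") == "ops-agent")) = true
    ∧ 1 < agent_rules.length
instance (agent_rules : List (List (String × String))) : Decidable (D_ValidateAgentTypes_py agent_rules) := by unfold D_ValidateAgentTypes_py; infer_instance

def Spec_ValidateAgentTypes_py (agent_rules : List (List (String × String))) (out : List String) : Prop := ¬ D_ValidateAgentTypes_py agent_rules → out = ValidateAgentTypes_py_alt agent_rules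
instance (agent_rules : List (List (String × String))) (out : List String) : Decidable (Spec_ValidateAgentTypes_py agent_rules out) := by unfold Spec_ValidateAgentTypes_py; infer_instance

def pvDiffWitness_ValidateAgentTypes_py : (List (List (String × String))) :=
  [[("type", "ops-agent")], [("type", "logging")]]

def pvDiffWitnessOut_ValidateAgentTypes_py : (List String) × (List String) :=
  (["An agent with type [AgentType.OPS_AGENT] is detected. No other agent type is allowed. The Ops Agent has both a logging module and a metrics module already."],
   ["An agent with type [ops-agent] is detected. No other agent type is allowed. The Ops Agent has both a logging module and a metrics module already."])

-- ===== CLAIM (what is proved, stated in full; the proofs are below) =====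
def Claim_unchanged_ValidateAgentTypes_py : Prop := ∀ (agent_rules : List (List (String × String))), Dom_ValidateAgentTypes_py agent_rules → Pre_ValidateAgentTypes_py agent_rules → Spec_ValidateAgentTypes_py agent_rules (ValidateAgentTypes_py agent_rules)
def Claim_changed_ValidateAgentTypes_py : Prop := Dom_ValidateAgentTypes_py (pvDiffWitness_ValidateAgentTypes_py) ∧ Pre_ValidateAgentTypes_py (pvDiffWitness_ValidateAgentTypes_py) ∧ D_ValidateAgentTypes_py (pvDiffWitness_ValidateAgentTypes_py) ∧ ValidateAgentTypes_py (pvDiffWitness_ValidateAgentTypes_py) = pvDiffWitnessOut_ValidateAgentTypes_py.1 ∧ ValidateAgentTypes_py_alt (pvDiffWitness_ValidateAgentTypes_py) = pvDiffWitnessOut_ValidateAgentTypes_py.2 ∧ pvDiffWitnessOut_ValidateAgentTypes_py.1 ≠ pvDiffWitnessOut_ValidateAgentTypes_py.2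
def Claim_exact_ValidateAgentTypes_py : Prop := ∀ (agent_rules : List (List (String × String))), Dom_ValidateAgentTypes_py agent_rules → Pre_ValidateAgentTypes_py agent_rules → D_ValidateAgentTypes_py agent_rules → ValidateAgentTypes_py agent_rules ≠ ValidateAgentTypes_py_alt agent_rules

-- ===== LEMMAS AND PROOFS =====

-- recursive view of Source B's scan loop (errors produced from state (prev, reported))
def vScan : Option String → Option String → List String → List String
  | _, _, [] => []
  | prev, rep, t :: rest =>
    if prev == some t && rep != some t then vMsgDup t :: vScan (some t) (some t) rest
    else vScan (some t) rep rest

-- duplicate values of a sorted list, in order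
def vDups : List String → List String
  | [] => []
  | a :: rest =>
    if rest.head? = some a then a :: vDups (rest.dropWhile (· == a))
    else vDups rest
  termination_by l => l.length
  decreasing_by
  · simp only [List.length_cons]
    have := List.length_dropWhile_le (· == a) rest
    omega
  · simp

theorem vFoldl_scan (ys : List String) : ∀ p r E,
    (ys.foldl vStep (p, r, E)).2.2 = E ++ vScan p r ys := by
  induction ys with
  | nil => intro p r E; simp [vScan]
  | cons t rest ih =>
    intro p r E
    simp only [List.foldl_cons, vStep, vScan]
    by_cases h : (p == some t && r != some t) = true
    · simp [h, ih]
    · simp [h, ih]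

theorem vScan_irrel (ys : List String) : ∀ (p : Option String) (a : String), a ∉ ys →
    vScan p (some a) ys = vScan p none ys := by
  induction ys with
  | nil => intro p a _; rfl
  | cons t rest ih =>
    intro p a ha
    have hat : a ≠ t := fun h => ha (h ▸ List.mem_cons_self ..)
    have har : a ∉ rest := fun h => ha (List.mem_cons_of_mem _ h)
    simp only [vScan]
    by_cases hp : (p == some t) = true
    · simp [hp, hat]
    · simp only [hp, Bool.false_and, Bool.false_eq_true, if_false]
      exact ih _ _ har

theorem vScan_run (a : String) : ∀ rest : List String, (a :: rest).Pairwise (· ≤ ·) →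
    vScan (some a) (some a) rest = vScan none none (rest.dropWhile (· == a)) := by
  intro rest
  induction rest with
  | nil => intro _; rfl
  | cons b tail ih =>
    intro hp
    by_cases hb : b = a
    · subst hb
      simp only [vScan, List.dropWhile_cons]
      have hple : (b :: tail).Pairwise (fun x y => x ≤ y) := by
        rcases List.pairwise_cons.mp hp with ⟨h1, h2⟩
        exact List.pairwise_cons.mpr ⟨fun y hy => h1 y (List.mem_cons_of_mem _ hy),
          (List.pairwise_cons.mp h2).2⟩
      simpa using ih hple
    · have hale : ∀ y ∈ b :: tail, a ≤ y := (List.pairwise_cons.mp hp).1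
      have hanotin : a ∉ tail := by
        intro hmem
        have h1 : a ≤ b := hale b (List.mem_cons_self ..)
        have h2 : b ≤ a := (List.pairwise_cons.mp (List.pairwise_cons.mp hp).2).1 a hmem
        exact hb (le_antisymm h2 h1)
      simp only [vScan]
      have hne : (some a == some b) = false := by
        simp; intro h; exact absurd h.symm hb
      rw [List.dropWhile_cons]
      have hba : (b == a) = false := by simp [hb]
      simp only [hba, Bool.false_eq_true, if_false, hne, Bool.false_and]
      rw [vScan_irrel _ _ _ hanotin]
      rfl

theorem vScan_main : ∀ n (ys : List String), ys.length ≤ n → ys.Pairwise (· ≤ ·) →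
    vScan none none ys = (vDups ys).map vMsgDup := by
  intro n
  induction n with
  | zero =>
    intro ys hlen _
    cases ys with
    | nil => simp [vScan, vDups]
    | cons a r => simp at hlen
  | succ n ih =>
    intro ys hlen hp
    cases ys with
    | nil => simp [vScan, vDups]
    | cons a rest =>
      have hstart : vScan none none (a :: rest) = vScan (some a) none rest := by
        simp [vScan]
      rw [hstart]
      cases rest with
      | nil => simp [vScan, vDups]
      | cons b tail =>
        by_cases hb : b = a
        · subst hb
          have hcond : ((some b == some b) && (none != some b)) = true := by simp
          simp only [vScan, hcond, if_true]
          have hptail : (b :: tail).Pairwise (fun x y => x ≤ y) :=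
            (List.pairwise_cons.mp hp).2
          rw [vScan_run b tail hptail]
          have hdw : (tail.dropWhile (· == b)).Pairwise (fun x y : String => x ≤ y) :=
            ((List.pairwise_cons.mp hptail).2).sublist (List.dropWhile_sublist _)
          have hlen' : (tail.dropWhile (· == b)).length ≤ n := by
            have := List.length_dropWhile_le (· == b) tail
            simp only [List.length_cons] at hlen; omega
          rw [ih _ hlen' hdw]
          have : vDups (b :: b :: tail) = b :: vDups (tail.dropWhile (· == b)) := by
            rw [vDups]
            simp
          rw [this]; rfl
        · have hcond : ((some a == some b) && (none != some b)) = false := by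
            simp; intro h; exact absurd h.symm hb
          simp only [vScan, hcond, Bool.false_eq_true, if_false]
          have hptail : (b :: tail).Pairwise (fun x y : String => x ≤ y) :=
            (List.pairwise_cons.mp hp).2
          have hlen' : (b :: tail).length ≤ n := by
            simp only [List.length_cons] at hlen ⊢; omega
          have := ih (b :: tail) hlen' hptail
          rw [show vScan (some b) none tail = vScan none none (b :: tail) by simp [vScan]]
          rw [this]
          rw [show vDups (a :: b :: tail) = vDups (b :: tail) by
            rw [vDups]; simp [hb]]

theorem vLt_dropWhile (a : String) : ∀ ys : List String, ys.Pairwise (· ≤ ·) →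
    (∀ y ∈ ys, a ≤ y) → ∀ k ∈ ys.dropWhile (· == a), a < k := by
  intro ys
  induction ys with
  | nil => intro _ _ k hk; simp at hk
  | cons c t ih =>
    intro hp hle k hk
    by_cases hc : c = a
    · subst hc
      rw [List.dropWhile_cons] at hk
      simp only [BEq.rfl, if_true] at hk
      exact ih (List.pairwise_cons.mp hp).2
        (fun y hy => le_trans (hle c (List.mem_cons_self ..)) ((List.pairwise_cons.mp hp).1 y hy)) k hk
    · rw [List.dropWhile_cons] at hk
      have : (c == a) = false := by simp [hc]
      simp only [this, Bool.false_eq_true, if_false] at hk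
      have hac : a < c := lt_of_le_of_ne (hle c (List.mem_cons_self ..)) (fun h => hc h.symm)
      rcases List.mem_cons.mp hk with h | h
      · exact h ▸ hac
      · exact lt_of_lt_of_le hac ((List.pairwise_cons.mp hp).1 k h)

theorem vDups_subset : ∀ n (ys : List String), ys.length ≤ n → ∀ k ∈ vDups ys, k ∈ ys := by
  intro n
  induction n with
  | zero =>
    intro ys hlen k hk
    cases ys with
    | nil => simp [vDups] at hk
    | cons a r => simp at hlen
  | succ n ih =>
    intro ys hlen k hk
    cases ys with
    | nil => simp [vDups] at hk
    | cons a rest =>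
      rw [vDups] at hk
      by_cases hh : rest.head? = some a
      · rw [if_pos hh] at hk
        rcases List.mem_cons.mp hk with h | h
        · exact h ▸ List.mem_cons_self ..
        · have hlen' : (rest.dropWhile (· == a)).length ≤ n := by
            have := List.length_dropWhile_le (· == a) rest
            simp only [List.length_cons] at hlen; omega
          have := ih _ hlen' k h
          exact List.mem_cons_of_mem _ ((List.dropWhile_sublist _).mem this)
      · rw [if_neg hh] at hk
        have hlen' : rest.length ≤ n := by simp only [List.length_cons] at hlen; omega
        exact List.mem_cons_of_mem _ (ih _ hlen' k hk)

theorem vCount_dropWhile (a k : String) (hk : k ≠ a) (tail : List String) :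
    (tail.dropWhile (· == a)).count k = tail.count k := by
  conv_rhs => rw [← List.takeWhile_append_dropWhile (p := (· == a)) (l := tail)]
  rw [List.count_append]
  have : (tail.takeWhile (· == a)).count k = 0 := by
    rw [List.count_eq_zero]
    intro hmem
    have := List.mem_takeWhile_imp hmem
    simp at this
    exact hk this
  omega

theorem vDups_mem : ∀ n (ys : List String), ys.length ≤ n → ys.Pairwise (· ≤ ·) →
    ∀ k, (k ∈ vDups ys ↔ 2 ≤ ys.count k) := by
  intro n
  induction n with
  | zero =>
    intro ys hlen _ k
    cases ys with
    | nil => simp [vDups]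
    | cons a r => simp at hlen
  | succ n ih =>
    intro ys hlen hp k
    cases ys with
    | nil => simp [vDups]
    | cons a rest =>
      rw [vDups]
      cases rest with
      | nil =>
        simp [vDups, List.count_singleton']
        split <;> omega
      | cons b tail =>
        by_cases hb : b = a
        · subst hb
          have hh : (b :: tail).head? = some b := rfl
          rw [if_pos hh]
          have hdw : (b :: tail).dropWhile (· == b) = tail.dropWhile (· == b) := by
            rw [List.dropWhile_cons]; simp
          rw [hdw]
          by_cases hk : k = b
          · subst hk
            simp
          · have hkb : (k == b) = false := by simp [hk]
            have hptail : (b :: tail).Pairwise (fun x y : String => x ≤ y) :=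
              (List.pairwise_cons.mp hp).2
            have hsort : (tail.dropWhile (· == b)).Pairwise (fun x y : String => x ≤ y) :=
              ((List.pairwise_cons.mp hptail).2).sublist (List.dropWhile_sublist _)
            have hlen' : (tail.dropWhile (· == b)).length ≤ n := by
              have := List.length_dropWhile_le (· == b) tail
              simp only [List.length_cons] at hlen; omega
            have hiff := ih _ hlen' hsort k
            have hcnt : (tail.dropWhile (· == b)).count k = tail.count k :=
              vCount_dropWhile b k hk tail
            have hbk : b ≠ k := fun h => hk h.symm
            simp [List.mem_cons, hk, hiff, hcnt, hbk]
        · have hne : (b :: tail).head? ≠ some a := by simp [hb]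
          rw [if_neg hne]
          have hptail : (b :: tail).Pairwise (fun x y : String => x ≤ y) :=
            (List.pairwise_cons.mp hp).2
          have hlen' : (b :: tail).length ≤ n := by
            simp only [List.length_cons] at hlen ⊢; omega
          have hanotin : a ∉ b :: tail := by
            intro hmem
            have h1 : a ≤ b := (List.pairwise_cons.mp hp).1 b (List.mem_cons_self ..)
            rcases List.mem_cons.mp hmem with h | h
            · exact hb h.symm
            · have h2 : b ≤ a := (List.pairwise_cons.mp hptail).1 a h
              exact hb (le_antisymm h2 h1)
          by_cases hk : k = a
          · subst hk
            have hnot : k ∉ vDups (b :: tail) := fun h =>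
              hanotin (vDups_subset (b :: tail).length _ le_rfl k h)
            have hc0 : (b :: tail).count k = 0 := List.count_eq_zero.mpr hanotin
            simp [hnot, hc0]
          · have hak : a ≠ k := fun h => hk h.symm
            rw [ih _ hlen' hptail k]
            simp [List.count_cons, hak]

theorem vDups_pairwise : ∀ n (ys : List String), ys.length ≤ n → ys.Pairwise (· ≤ ·) →
    (vDups ys).Pairwise (· < ·) := by
  intro n
  induction n with
  | zero =>
    intro ys hlen _
    cases ys with
    | nil => simp [vDups]
    | cons a r => simp at hlen
  | succ n ih =>
    intro ys hlen hp
    cases ys with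
    | nil => simp [vDups]
    | cons a rest =>
      rw [vDups]
      by_cases hh : rest.head? = some a
      · rw [if_pos hh]
        cases rest with
        | nil => simp at hh
        | cons b tail =>
          have hb : b = a := by simpa using hh
          subst hb
          have hdw : (b :: tail).dropWhile (· == b) = tail.dropWhile (· == b) := by
            rw [List.dropWhile_cons]; simp
          rw [hdw]
          have hptail : (b :: tail).Pairwise (fun x y : String => x ≤ y) :=
            (List.pairwise_cons.mp hp).2
          have hsort : (tail.dropWhile (· == b)).Pairwise (fun x y : String => x ≤ y) :=
            ((List.pairwise_cons.mp hptail).2).sublist (List.dropWhile_sublist _)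
          have hlen' : (tail.dropWhile (· == b)).length ≤ n := by
            have := List.length_dropWhile_le (· == b) tail
            simp only [List.length_cons] at hlen; omega
          refine List.pairwise_cons.mpr ⟨?_, ih _ hlen' hsort⟩
          intro k hk
          have hkdw : k ∈ tail.dropWhile (· == b) :=
            vDups_subset _ _ le_rfl k hk
          exact vLt_dropWhile b tail (List.pairwise_cons.mp hptail).2
            (fun y hy => (List.pairwise_cons.mp hptail).1 y hy) k hkdw
      · rw [if_neg hh]
        have hlen' : rest.length ≤ n := by simp only [List.length_cons] at hlen; omega
        exact ih _ hlen' (List.pairwise_cons.mp hp).2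

theorem vSum_ite (x : String) : ∀ S : List String, S.Nodup → x ∈ S →
    (S.map (fun k => if x == k then (1 : Int) else 0)).sum = 1 := by
  intro S
  induction S with
  | nil => intro _ h; simp at h
  | cons c S ih =>
    intro hnd hx
    rcases List.mem_cons.mp hx with h | h
    · subst h
      have hnot : x ∉ S := (List.nodup_cons.mp hnd).1
      have hz : (S.map (fun k => if x == k then (1 : Int) else 0)).sum = 0 := by
        rw [List.sum_eq_zero]
        intro y hy
        rcases List.mem_map.mp hy with ⟨k, hk, rfl⟩
        have : (x == k) = false := by
          simp; intro h; exact hnot (h ▸ hk)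
        simp [this]
      rw [List.map_cons, List.sum_cons, hz]
      simp
    · have hcx : (x == c) = false := by
        simp; intro hcx; exact (List.nodup_cons.mp hnd).1 (hcx ▸ h)
      rw [List.map_cons, List.sum_cons]
      rw [if_neg (by simp [hcx] : ¬ ((x == c) = true)), zero_add]
      exact ih (List.nodup_cons.mp hnd).2 h

theorem vSum_counts (xs : List String) : ∀ S : List String, S.Nodup → (∀ x ∈ xs, x ∈ S) →
    (S.map (fun k => (xs.count k : Int))).sum = xs.length := by
  induction xs with
  | nil => intro S _ _; simp
  | cons x xs ih =>
    intro S hnd hcov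
    have hx : x ∈ S := hcov x (List.mem_cons_self ..)
    have hmap : S.map (fun k => ((x :: xs).count k : Int))
        = S.map (fun k => (xs.count k : Int) + (if x == k then (1 : Int) else 0)) := by
      apply List.map_congr_left
      intro k _
      rw [List.count_cons]
      push_cast
      rfl
    have hsplit : (S.map (fun k => ((x :: xs).count k : Int))).sum
        = (S.map (fun k => (xs.count k : Int))).sum
          + (S.map (fun k => if x == k then (1 : Int) else 0)).sum := by
      rw [hmap, ← List.sum_map_add]
    rw [hsplit, ih S hnd (fun y hy => hcov y (List.mem_cons_of_mem _ hy)),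
      vSum_ite x S hnd hx]
    simp only [List.length_cons]
    push_cast
    ring

-- both ports return the duplicate messages, plus their own conflict message exactly on D_
theorem vShape (agent_rules : List (List (String × String))) :
    ∃ E : List String,
      ValidateAgentTypes_py agent_rules
        = (if D_ValidateAgentTypes_py agent_rules then E ++ [vMsgOpsA] else E) ∧
      ValidateAgentTypes_py_alt agent_rules
        = (if D_ValidateAgentTypes_py agent_rules then E ++ [vMsgOpsB] else E) := by
  unfold ValidateAgentTypes_py ValidateAgentTypes_py_alt
  set xs := agent_rules.map vType with hxs
  set ys := PySem.List.sorted xs (fun x => x) false with hys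
  have hperm : ys.Perm xs := PySem.List.sorted_perm ..
  have hsorted : ys.Pairwise (· ≤ ·) := PySem.List.sorted_pairwise ..
  refine ⟨(vDups ys).map vMsgDup, ?_, ?_⟩
  -- D_ in terms of xs
  · have hnodupS : (PySem.Set.ofList xs).Nodup := PySem.Set.nodup_ofList ..
    have hdup :
        PySem.List.sorted
          (((PySem.Dict.counter xs).items.filter (fun kv => decide (1 < kv.2))).map (fun kv => kv.1))
          (fun x => x) false = vDups ys := by
      rw [PySem.Dict.items_counter, List.filter_map, List.map_map]
      have h1 : ((fun kv : String × Int => kv.1) ∘ fun k => (k, (xs.count k : Int))) = id := rfl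
      have h2 : ((fun kv : String × Int => decide (1 < kv.2)) ∘ fun k => (k, (xs.count k : Int)))
          = fun k => decide (1 < (xs.count k : Int)) := rfl
      rw [h1, h2, List.map_id]
      apply PySem.List.sorted_eq_of_perm_of_pairwise_lt
      · rw [List.perm_ext_iff_of_nodup (vDups_pairwise ys.length ys le_rfl hsorted |>.imp ne_of_lt)
          (hnodupS.filter _)]
        intro k
        rw [vDups_mem ys.length ys le_rfl hsorted k, List.mem_filter]
        have hcnt : ys.count k = xs.count k := hperm.count_eq k
        constructor
        · intro h
          rw [hcnt] at h
          refine ⟨(PySem.Set.mem_ofList ..).mpr (List.count_pos_iff.mp (by omega)), ?_⟩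
          simp only [decide_eq_true_eq]
          exact_mod_cast h
        · intro ⟨_, h⟩
          simp only [decide_eq_true_eq] at h
          rw [hcnt]
          exact_mod_cast h
      · exact vDups_pairwise ys.length ys le_rfl hsorted
    have hops : (PySem.Dict.counter xs).getD "ops-agent" 0 = (xs.count "ops-agent" : Int) :=
      PySem.Dict.getD_counter ..
    have hsum : (PySem.Dict.counter xs).values.sum = (xs.length : Int) := by
      have hv : (PySem.Dict.counter xs).values
          = (PySem.Set.ofList xs).map (fun k => (xs.count k : Int)) := by
        simp only [PySem.Dict.values, PySem.Dict.items_counter, List.map_map]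
        rfl
      rw [hv]
      exact vSum_counts xs _ hnodupS (fun x hx => (PySem.Set.mem_ofList ..).mpr hx)
    have hDiff : (0 < (xs.count "ops-agent" : Int) ∧ 1 < (xs.length : Int))
        ↔ D_ValidateAgentTypes_py agent_rules := by
      unfold D_ValidateAgentTypes_py
      rw [List.any_eq_true]
      constructor
      · intro ⟨h1, h2⟩
        have hmem : "ops-agent" ∈ xs := List.count_pos_iff.mp (by exact_mod_cast h1)
        rcases List.mem_map.mp hmem with ⟨r, hr, hrt⟩
        refine ⟨⟨r, hr, by simp [vType] at hrt ⊢; exact hrt⟩, ?_⟩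
        have : 1 < xs.length := by exact_mod_cast h2
        simpa [hxs] using this
      · intro ⟨⟨r, hr, hrt⟩, h2⟩
        have hmem : "ops-agent" ∈ xs := by
          refine List.mem_map.mpr ⟨r, hr, ?_⟩
          simp [vType]
          simpa using hrt
        constructor
        · exact_mod_cast List.count_pos_iff.mpr hmem
        · have : 1 < xs.length := by simpa [hxs] using h2
          exact_mod_cast this
    simp only [hdup, hops, hsum]
    by_cases hd : D_ValidateAgentTypes_py agent_rules
    · rw [if_pos (hDiff.mpr hd), if_pos hd]
    · rw [if_neg (fun h => hd (hDiff.mp h)), if_neg hd]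
  · have hBerr : (ys.foldl vStep (none, none, [])).2.2 = (vDups ys).map vMsgDup := by
      rw [vFoldl_scan, List.nil_append, vScan_main ys.length ys le_rfl hsorted]
    have hDiff : (ys.contains "ops-agent" && decide (1 < ys.length)) = true
        ↔ D_ValidateAgentTypes_py agent_rules := by
      unfold D_ValidateAgentTypes_py
      rw [Bool.and_eq_true, List.contains_iff_mem, hperm.mem_iff, List.any_eq_true,
        decide_eq_true_iff, hys, PySem.List.length_sorted]
      constructor
      · intro ⟨h1, h2⟩
        rcases List.mem_map.mp h1 with ⟨r, hr, hrt⟩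
        refine ⟨⟨r, hr, by simp [vType] at hrt ⊢; exact hrt⟩, by simpa [hxs] using h2⟩
      · intro ⟨⟨r, hr, hrt⟩, h2⟩
        refine ⟨List.mem_map.mpr ⟨r, hr, by simp [vType]; simpa using hrt⟩, by simpa [hxs] using h2⟩
    simp only [hBerr]
    by_cases hd : D_ValidateAgentTypes_py agent_rules
    · rw [if_pos (hDiff.mpr hd), if_pos hd]
    · rw [if_neg (fun h => hd (hDiff.mp h)), if_neg hd]

set_option maxRecDepth 10000 in
theorem vMsgs_ne : vMsgOpsA ≠ vMsgOpsB := by decide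

-- ===== VERDICT (by name: the statement is the Claim_ definition above) =====
theorem ValidateAgentTypes_py_spec : Claim_unchanged_ValidateAgentTypes_py := by
  intro agent_rules _ _ hnd
  rcases vShape agent_rules with ⟨E, hA, hB⟩
  rw [hA, hB, if_neg hnd, if_neg hnd]

set_option maxRecDepth 10000 in
theorem ValidateAgentTypes_py_changed : Claim_changed_ValidateAgentTypes_py := by
  unfold Claim_changed_ValidateAgentTypes_py
  refine ⟨by decide, by decide, by decide, by rfl, ?_, by decide⟩
  have hmap : List.map vType pvDiffWitness_ValidateAgentTypes_py = ["ops-agent", "logging"] := by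
    decide
  have hs : PySem.List.sorted (["ops-agent", "logging"] : List String) (fun x => x) false
      = ["logging", "ops-agent"] := by
    simp [PySem.List.sorted_eq_foldl_insertBy, PySem.List.insertBy, String.lt_iff_toList_lt]
    decide
  unfold ValidateAgentTypes_py_alt
  rw [hmap, hs]
  decide

theorem ValidateAgentTypes_py_tight : Claim_exact_ValidateAgentTypes_py := by
  intro agent_rules _ _ hd
  rcases vShape agent_rules with ⟨E, hA, hB⟩
  rw [hA, hB, if_pos hd, if_pos hd]
  intro h
  exact vMsgs_ne (List.append_inj_right h rfl |> List.cons.inj |>.1)
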